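-- pv_equiv track=rewrite | github.com/aashrayap/dot-agent | skills/projects/scripts/update-execution.py | table_row_count
-- ===== SOURCE A (Python) =====
-- def section_bounds(lines: list[str], header: str) -> tuple[int, int]:
--     try:
--         start = lines.index(header)
--     except ValueError as exc:
--         raise SystemExit(f"ERROR: missing section {header!r}") from exc
--     end = len(lines)
--     for idx in range(start + 1, len(lines)):
--         if lines[idx].startswith("## ") and lines[idx] != header:
--             end = idx
--             break
--     return start, end
--
-- def table_row_count(lines: list[str], header: str) -> int:
--     start, end = section_bounds(lines, header)
--     count = 0
--     for line in lines[start + 3 : end]: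
--         stripped = line.strip()
--         if stripped.startswith("|") and not set(stripped.replace("|", "").strip()) <= {"-", " "}:
--             count += 1
--     return count
-- ===== SOURCE B (Python) =====
-- def table_row_count(lines: list[str], header: str) -> int:
--     count = 0
--     header_idx = None
--     for i, line in enumerate(lines):
--         if header_idx is None:
--             if line == header:
--                 header_idx = i
--         else:
--             if line.startswith("## ") and line != header:
--                 break
--             if i >= header_idx + 3:
--                 stripped = line.strip()
--                 if stripped.startswith("|") and not set(stripped.replace("|", "").strip()) <= {"-", " "}:
--                     count += 1
--     if header_idx is None:
--         raise SystemExit(f"ERROR: missing section {header!r}")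
--     return count
-- ===== Notes on version B (the rewrite author's own statement) =====
-- stated objective: simpler
-- what changed: Replaces the two-phase section_bounds-then-slice design with a single stateful pass over enumerate(lines) that finds the header, skips two lines, and counts data rows until the next section header, eliminating the helper and the slice.
import Mathlib
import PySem

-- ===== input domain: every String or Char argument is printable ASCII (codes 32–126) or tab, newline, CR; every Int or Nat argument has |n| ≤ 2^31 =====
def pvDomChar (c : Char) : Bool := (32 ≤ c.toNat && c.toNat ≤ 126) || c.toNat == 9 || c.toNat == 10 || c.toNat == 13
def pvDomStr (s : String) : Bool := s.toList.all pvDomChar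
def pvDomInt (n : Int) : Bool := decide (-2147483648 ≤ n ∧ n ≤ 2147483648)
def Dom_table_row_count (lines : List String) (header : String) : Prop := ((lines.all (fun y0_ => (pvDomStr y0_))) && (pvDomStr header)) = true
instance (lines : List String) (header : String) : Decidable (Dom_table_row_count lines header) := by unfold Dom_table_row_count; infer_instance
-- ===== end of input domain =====

-- B collapses A's section_bounds helper + slice into one stateful pass over enumerate(lines) (simpler decomposition, same O(n) cost).

-- ===== PORT A =====
-- the data-row test shared verbatim by both Pythons:
--   stripped.startswith("|") and not set(stripped.replace("|","").strip()) <= {"-", " "}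
def pvIsRow (line : String) : Bool :=
  let stripped := PySem.Str.strip line
  PySem.Str.startswith stripped "|" &&
  !(PySem.Set.issubset (PySem.Set.ofList (PySem.Str.strip (PySem.Str.replace stripped "|" "")).toList) ['-', ' '])

-- the 'for idx in range(start+1, len(lines)): … break' loop of section_bounds
def pvEndLoop (lines : List String) (header : String) (idxs : List Int) (endDefault : Int) : Int :=
  match idxs with
  | [] => endDefault
  | idx :: rest =>
    let line := PySem.List.pyGetD lines idx ""
    if PySem.Str.startswith line "## " && (line != header) then idx
    else pvEndLoop lines header rest endDefault

def table_row_count (lines : List String) (header : String) : Int :=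
  match PySem.List.index? lines header with
  | none => 0  -- Python raises SystemExit here; excluded by Pre_
  | some start =>
    let e := pvEndLoop lines header (PySem.List.pyRange ((start : Int) + 1) (lines.length : Int) 1) (lines.length : Int)
    (PySem.List.slice lines (some ((start : Int) + 3)) (some e)).foldl
      (fun count line => if pvIsRow line then count + 1 else count) (0 : Int)

-- ===== PORT B =====
-- the single 'for i, line in enumerate(lines)' loop with state (header_idx, count)
def pvScan (header : String) : List (Int × String) → Option Int → Int → Int
  | [], _, count => count
  | (i, line) :: rest, none, count =>
    if line == header then pvScan header rest (some i) count
    else pvScan header rest none count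
  | (i, line) :: rest, some h, count =>
    if PySem.Str.startswith line "## " && (line != header) then count
    else pvScan header rest (some h)
      (if decide (i ≥ h + 3) && pvIsRow line then count + 1 else count)

def table_row_count_alt (lines : List String) (header : String) : Int :=
  pvScan header (PySem.List.enumerate lines 0) none 0
  -- Python raises SystemExit after the loop if header was never found; excluded by Pre_

-- ===== PRECONDITION & SPEC =====
-- Pre_ excludes exactly the inputs where A raises SystemExit (header absent from lines); B raises there too.
def Pre_table_row_count (lines : List String) (header : String) : Prop := header ∈ lines
instance (lines : List String) (header : String) : Decidable (Pre_table_row_count lines header) := by unfold Pre_table_row_count; infer_instance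
def pvWitness_table_row_count : List String × String :=
  (["## S", "", "| h |", "|---|", "| a |", "## T"], "## S")
def Spec_table_row_count (lines : List String) (header : String) (out : Int) : Prop := out = table_row_count_alt lines header
instance (lines : List String) (header : String) (out : Int) : Decidable (Spec_table_row_count lines header out) := by unfold Spec_table_row_count; infer_instance

-- ===== CLAIM (what is proved, stated in full; the proofs are below) =====
def Claim_equal_table_row_count : Prop := ∀ (lines : List String) (header : String), Dom_table_row_count lines header → Pre_table_row_count lines header → Spec_table_row_count lines header (table_row_count lines header)

-- ===== LEMMAS AND PROOFS =====

-- the break test of both loops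
def pvIsBreak (header line : String) : Bool := PySem.Str.startswith line "## " && (line != header)

-- common intermediate: count data rows in t, skipping the first `skip` lines, stopping at a break line
def pvG (header : String) : List String → Nat → Int
  | [], _ => 0
  | l :: rest, 0 =>
    if pvIsBreak header l then 0 else (if pvIsRow l then 1 else 0) + pvG header rest 0
  | l :: rest, skip + 1 =>
    if pvIsBreak header l then 0 else pvG header rest skip

theorem pvG_nil (header : String) (skip : Nat) : pvG header [] skip = 0 := by
  cases skip <;> rfl

theorem pvG_cons_break (header l : String) (rest : List String) (skip : Nat)
    (hb : pvIsBreak header l = true) : pvG header (l :: rest) skip = 0 := by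
  cases skip <;> simp [pvG, hb]

theorem pvG_cons_zero (header l : String) (rest : List String)
    (hb : pvIsBreak header l = false) :
    pvG header (l :: rest) 0 = (if pvIsRow l then 1 else 0) + pvG header rest 0 := by
  simp [pvG, hb]

theorem pvG_cons_succ (header l : String) (rest : List String) (k : Nat)
    (hb : pvIsBreak header l = false) :
    pvG header (l :: rest) (k + 1) = pvG header rest k := by
  simp [pvG, hb]

theorem pvScan_cons_some (header l : String) (rest : List (Int × String)) (i h c : Int) :
    pvScan header ((i, l) :: rest) (some h) c
      = if pvIsBreak header l then c
        else pvScan header rest (some h)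
          (if decide (i ≥ h + 3) && pvIsRow l then c + 1 else c) := rfl

theorem pvG_eq_countP (header : String) (t : List String) (skip : Nat) :
    pvG header t skip = (((t.takeWhile (fun l => !pvIsBreak header l)).drop skip).countP pvIsRow : Int) := by
  induction t generalizing skip with
  | nil => simp [pvG_nil]
  | cons l rest ih =>
    cases hb : pvIsBreak header l with
    | true => rw [pvG_cons_break _ _ _ _ hb]; simp [List.takeWhile_cons, hb]
    | false =>
      cases skip with
      | zero =>
        rw [pvG_cons_zero _ _ _ hb, ih 0]
        simp only [List.takeWhile_cons, hb, Bool.not_false, if_true, List.drop_zero,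
          List.countP_cons]
        cases hr : pvIsRow l <;> simp [hr] <;> push_cast <;> ring
      | succ k =>
        rw [pvG_cons_succ _ _ _ _ hb, ih k]
        simp [List.takeWhile_cons, hb]

theorem pvScan_some (header : String) (t : List String) :
    ∀ (i h c : Int), pvScan header (PySem.List.enumerate t i) (some h) c
      = c + pvG header t (h + 3 - i).toNat := by
  induction t with
  | nil => intro i h c; simp [PySem.List.enumerate_nil, pvScan, pvG_nil]
  | cons l rest ih =>
    intro i h c
    rw [PySem.List.enumerate_cons, pvScan_cons_some]
    cases hb : pvIsBreak header l with
    | true => rw [if_pos rfl, pvG_cons_break _ _ _ _ hb]; ring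
    | false =>
      rw [if_neg (by simp), ih (i + 1) h]
      by_cases hge : i ≥ h + 3
      · have h0 : (h + 3 - i).toNat = 0 := by omega
        have h1 : (h + 3 - (i + 1)).toNat = 0 := by omega
        rw [h0, h1, pvG_cons_zero _ _ _ hb]
        cases hr : pvIsRow l
        · simp [hge, hr]
        · simp [hge, hr]; ring
      · have h1 : (h + 3 - (i + 1)).toNat = (h + 3 - i).toNat - 1 := by omega
        have h2 : (h + 3 - i).toNat = ((h + 3 - i).toNat - 1) + 1 := by omega
        rw [if_neg (by simp [hge]), h1]
        conv_rhs => rw [h2]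
        rw [pvG_cons_succ _ _ _ _ hb]

theorem pvScan_pre (header : String) (tail : List String) (pre : List String) :
    ∀ (i c : Int), header ∉ pre →
    pvScan header (PySem.List.enumerate (pre ++ header :: tail) i) none c
      = pvScan header (PySem.List.enumerate tail (i + pre.length + 1)) (some (i + pre.length)) c := by
  induction pre with
  | nil =>
    intro i c _
    simp only [List.nil_append, PySem.List.enumerate_cons, pvScan, List.length_cons,
      List.length_nil]
    simp
  | cons p pre' ih =>
    intro i c hmem
    have hne : p ≠ header := fun h => hmem (h ▸ List.mem_cons_self)
    simp only [List.cons_append, PySem.List.enumerate_cons, pvScan]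
    rw [if_neg (by simp [hne])]
    rw [ih (i + 1) c (fun h => hmem (List.mem_cons_of_mem _ h))]
    have e1 : i + 1 + (pre'.length : Int) + 1 = i + ((p :: pre').length : Int) + 1 := by
      simp; ring
    have e2 : i + 1 + (pre'.length : Int) = i + ((p :: pre').length : Int) := by
      simp; ring
    rw [e1, e2]

theorem pvEndLoop_eq (lines : List String) (header : String) (t : List String) :
    ∀ (j : Int), 0 ≤ j → lines.drop j.toNat = t → j + t.length = (lines.length : Int) →
    pvEndLoop lines header (PySem.List.pyRange j (lines.length : Int) 1) (lines.length : Int)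
      = j + ((t.takeWhile (fun l => !pvIsBreak header l)).length : Int) := by
  induction t with
  | nil =>
    intro j _ _ hlen
    simp only [List.length_nil, Nat.cast_zero, add_zero] at hlen
    rw [PySem.List.pyRange_one_eq_nil (by omega)]
    simp only [pvEndLoop, List.takeWhile_nil, List.length_nil, Nat.cast_zero, add_zero]
    omega
  | cons l rest ih =>
    intro j hj hdrop hlen
    have hjlt : j < (lines.length : Int) := by
      simp only [List.length_cons] at hlen; push_cast at hlen; omega
    rw [PySem.List.pyRange_one_cons hjlt]
    simp only [pvEndLoop]
    have hlt : j.toNat < lines.length := by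
      have := congrArg List.length hdrop
      simp only [List.length_drop, List.length_cons] at this
      omega
    have hget : PySem.List.pyGetD lines j "" = l := by
      rw [PySem.List.pyGetD_eq_getElem lines "" hj (by push_cast; omega)]
      have h0 : (lines.drop j.toNat)[0]'(by rw [hdrop]; simp) = l := by
        simp [hdrop]
      rw [List.getElem_drop] at h0
      simpa using h0
    rw [hget]
    have hcond : (PySem.Str.startswith l "## " && (l != header)) = pvIsBreak header l := rfl
    rw [hcond]
    cases hb : pvIsBreak header l with
    | true =>
      rw [if_pos rfl]
      simp [List.takeWhile_cons, hb]
    | false =>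
      rw [if_neg (by simp)]
      have hdrop' : lines.drop (j + 1).toNat = rest := by
        have h1 : (j + 1).toNat = j.toNat + 1 := by omega
        rw [h1, ← List.drop_drop, hdrop]
        simp [List.drop_one]
      rw [ih (j + 1) (by omega) hdrop'
        (by simp only [List.length_cons] at hlen ⊢; push_cast at hlen ⊢; omega)]
      simp only [List.takeWhile_cons, hb, Bool.not_false, if_true, List.length_cons]
      push_cast; ring

theorem foldl_count_eq (l : List String) : ∀ (c : Int),
    l.foldl (fun count line => if pvIsRow line then count + 1 else count) c
      = c + (l.countP pvIsRow : Int) := by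
  induction l with
  | nil => intro c; simp
  | cons x xs ih =>
    intro c
    simp only [List.foldl_cons, List.countP_cons, ih]
    cases hr : pvIsRow x <;> simp [hr] <;> push_cast <;> ring

-- ===== VERDICT (by name: the statement is the Claim_ definition above) =====
theorem table_row_count_spec : Claim_equal_table_row_count := by
  intro lines header _ hpre
  unfold Spec_table_row_count
  have hsome : (PySem.List.index? lines header).isSome := by
    rw [PySem.List.index?_isSome_iff]; exact hpre
  obtain ⟨s, hs⟩ := Option.isSome_iff_exists.mp hsome
  obtain ⟨pre, tail, hdec, hlen, hnmem⟩ := (PySem.List.index?_eq_some_iff lines header s).mp hs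
  -- B side reduces to pvG header tail 2
  have hB : table_row_count_alt lines header = pvG header tail 2 := by
    unfold table_row_count_alt
    rw [hdec, pvScan_pre header tail pre 0 0 hnmem, pvScan_some]
    rw [hlen]
    norm_num
    rfl
  -- A side reduces to the same count
  set w := (tail.takeWhile (fun l => !pvIsBreak header l)).length with hw_def
  have hwtake : tail.takeWhile (fun l => !pvIsBreak header l) = tail.take w := by
    rw [hw_def]
    exact List.prefix_iff_eq_take.mp (List.takeWhile_prefix _)
  have hdropj : lines.drop (s + 1) = tail := by
    rw [hdec, ← hlen]
    rw [show pre.length + 1 = pre.length + 1 from rfl]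
    rw [List.drop_append]
    simp
  have hlinlen : (s : Int) + 1 + (tail.length : Int) = (lines.length : Int) := by
    rw [hdec, ← hlen]; simp; push_cast; ring
  have hend : pvEndLoop lines header (PySem.List.pyRange ((s : Int) + 1) (lines.length : Int) 1) (lines.length : Int)
      = (s : Int) + 1 + (w : Int) := by
    rw [pvEndLoop_eq lines header tail ((s : Int) + 1) (by omega)
      (by rw [show ((s : Int) + 1).toNat = s + 1 by omega]; exact hdropj) hlinlen]
  have hA : table_row_count lines header = (((tail.take w).drop 2).countP pvIsRow : Int) := by
    unfold table_row_count
    rw [hs]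
    simp only [hend]
    rw [show ((s : Int) + 1 + (w : Int)) = (((s + 1 + w : Nat) : Int)) by push_cast; ring]
    rw [show ((s : Int) + 3) = (((s + 3 : Nat) : Int)) by push_cast; ring]
    rw [PySem.List.slice_natCast]
    have hds : lines.drop (s + 3) = tail.drop 2 := by
      rw [show s + 3 = (s + 1) + 2 by omega, ← List.drop_drop, hdropj]
    rw [hds, foldl_count_eq]
    rw [show s + 1 + w - (s + 3) = w - 2 by omega]
    rw [show (tail.drop 2).take (w - 2) = (tail.take w).drop 2 by rw [List.drop_take]]
    simp
  rw [hA, hB, pvG_eq_countP, hwtake]
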